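-- pv_equiv track=rewrite | github.com/sandeepyadav10011995/Data-Structures | Striver/Array/3. Rotate Array By K Places.py | leftRotateArrayByDPlacesBetterSolution
-- ===== SOURCE A (Python) =====
-- def leftRotateArrayByDPlacesBetterSolution(nums: list[int], N: int, D: int) -> list[int]:
--     D %= N
--
--     if D == 0:
--         return nums
--
--     temp = [nums[i] for i in range(D)]
--
--     for i in range(D, N):
--         nums[i-D] = nums[i]
--
--     for i in range(N-D, N):
--         nums[i] = temp[i-(N-D)]
--
--     return nums
-- ===== SOURCE B (Python) =====
-- def leftRotateArrayByDPlacesBetterSolution(nums: list[int], N: int, D: int) -> list[int]: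
--     D %= N
--
--     if D == 0:
--         return nums
--
--     def _reverse(i, j):
--         while i < j:
--             nums[i], nums[j] = nums[j], nums[i]
--             i += 1
--             j -= 1
--
--     _reverse(0, D - 1)
--     _reverse(D, N - 1)
--     _reverse(0, N - 1)
--     return nums
-- ===== Notes on version B (the rewrite author's own statement) =====
-- stated objective: alternative
-- what changed: Replaces A's temp-buffer copy of the first D elements followed by two shift/copy-back loops with the classic in-place three-reversal rotation (reverse nums[0:D], reverse nums[D:N], reverse nums[0:N] by pairwise end swaps), trading the O(D) auxiliary buffer for O(1) extra space at the same O(N) time.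
import Mathlib
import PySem

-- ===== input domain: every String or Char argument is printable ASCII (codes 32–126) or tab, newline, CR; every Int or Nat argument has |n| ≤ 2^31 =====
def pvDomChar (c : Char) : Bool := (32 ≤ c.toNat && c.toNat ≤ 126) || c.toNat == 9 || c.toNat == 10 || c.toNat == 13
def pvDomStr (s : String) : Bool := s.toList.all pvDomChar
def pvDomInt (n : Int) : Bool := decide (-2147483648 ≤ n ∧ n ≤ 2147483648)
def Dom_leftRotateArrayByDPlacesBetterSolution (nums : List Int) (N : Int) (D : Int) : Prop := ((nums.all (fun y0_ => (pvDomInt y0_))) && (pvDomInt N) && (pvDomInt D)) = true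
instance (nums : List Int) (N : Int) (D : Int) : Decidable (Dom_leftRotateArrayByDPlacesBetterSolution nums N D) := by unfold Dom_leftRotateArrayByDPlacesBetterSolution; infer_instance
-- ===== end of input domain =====

-- B replaces A's temp-buffer copy-and-shift by the classic in-place three-reversal rotation;
-- both Pythons mutate `nums` in place and return it, so the side effect matches as well.

-- ===== PORT A =====
-- pyGetD with default 0 is used where Python indexes: inside Pre_ every executed index is in range,
-- so the default is never read and the port is exact there.
def leftRotateArrayByDPlacesBetterSolution (nums : List Int) (N : Int) (D : Int) : List Int :=
  let d := PySem.Int.mod D N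
  if d = 0 then nums
  else
    let temp := (PySem.List.pyRange 0 d 1).map (fun i => PySem.List.pyGetD nums i 0)
    let a := (PySem.List.pyRange d N 1).foldl
      (fun xs i => PySem.List.pySetD xs (i - d) (PySem.List.pyGetD xs i 0)) nums
    (PySem.List.pyRange (N - d) N 1).foldl
      (fun xs i => PySem.List.pySetD xs i (PySem.List.pyGetD temp (i - (N - d)) 0)) a

-- ===== PORT B =====
-- the `while i < j: swap ends; i += 1; j -= 1` helper of Source B
def pvRev (xs : List Int) (i j : Int) : List Int :=
  if i < j then
    let a := PySem.List.pyGetD xs i 0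
    let b := PySem.List.pyGetD xs j 0
    pvRev (PySem.List.pySetD (PySem.List.pySetD xs i b) j a) (i + 1) (j - 1)
  else xs
termination_by (j - i).toNat
decreasing_by omega

def leftRotateArrayByDPlacesBetterSolution_alt (nums : List Int) (N : Int) (D : Int) : List Int :=
  let d := PySem.Int.mod D N
  if d = 0 then nums
  else pvRev (pvRev (pvRev nums 0 (d - 1)) d (N - 1)) 0 (N - 1)

-- ===== PRECONDITION & SPEC =====
-- Exactly the inputs on which the Python A returns: N = 0 raises ZeroDivisionError at `D %= N`,
-- and N > len(nums) with D % N ≠ 0 raises IndexError in the shift loop.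
def Pre_leftRotateArrayByDPlacesBetterSolution (nums : List Int) (N : Int) (D : Int) : Prop :=
  N ≠ 0 ∧ (N ≤ (nums.length : Int) ∨ PySem.Int.mod D N = 0)
instance (nums : List Int) (N : Int) (D : Int) : Decidable (Pre_leftRotateArrayByDPlacesBetterSolution nums N D) := by unfold Pre_leftRotateArrayByDPlacesBetterSolution; infer_instance

def pvWitness_leftRotateArrayByDPlacesBetterSolution : List Int × Int × Int := ([1, 2, 3, 4, 5], 5, 2)

def Spec_leftRotateArrayByDPlacesBetterSolution (nums : List Int) (N : Int) (D : Int) (out : List Int) : Prop := out = leftRotateArrayByDPlacesBetterSolution_alt nums N D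
instance (nums : List Int) (N : Int) (D : Int) (out : List Int) : Decidable (Spec_leftRotateArrayByDPlacesBetterSolution nums N D out) := by unfold Spec_leftRotateArrayByDPlacesBetterSolution; infer_instance

-- ===== CLAIM (what is proved, stated in full; the proofs are below) =====
def Claim_equal_leftRotateArrayByDPlacesBetterSolution : Prop := ∀ (nums : List Int) (N : Int) (D : Int), Dom_leftRotateArrayByDPlacesBetterSolution nums N D → Pre_leftRotateArrayByDPlacesBetterSolution nums N D → Spec_leftRotateArrayByDPlacesBetterSolution nums N D (leftRotateArrayByDPlacesBetterSolution nums N D)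

-- ===== LEMMAS AND PROOFS =====

theorem pvRev_length (xs : List Int) (i j : Int) : (pvRev xs i j).length = xs.length := by
  fun_induction pvRev xs i j with
  | case1 xs i j h a b ih => simp [ih, PySem.List.length_pySetD]
  | case2 => rfl

-- pointwise description of one in-place segment reversal
theorem pvRev_get (xs : List Int) (i j : Int) :
    ∀ (k : Nat), 0 ≤ i → j < (xs.length : Int) →
    (pvRev xs i j)[k]? = if i ≤ (k : Int) ∧ (k : Int) ≤ j then xs[(i + j - (k : Int)).toNat]? else xs[k]? := by
  fun_induction pvRev xs i j with
  | case2 xs i j h =>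
    intro k hi hj
    split
    · next hk =>
      have he : (i + j - (k : Int)).toNat = k := by omega
      rw [he]
    · rfl
  | case1 xs i j h a b ih =>
    intro k hi hj
    have hij : i < j := h
    have hb : b = xs[j.toNat] := PySem.List.pyGetD_eq_getElem _ _ (by omega) hj
    have ha : a = xs[i.toNat] := PySem.List.pyGetD_eq_getElem _ _ hi (by omega)
    have hset1 : PySem.List.pySetD xs i b = xs.set i.toNat b := PySem.List.pySetD_of_nonneg _ _ hi
    have hset2 : PySem.List.pySetD (xs.set i.toNat b) j a = (xs.set i.toNat b).set j.toNat a :=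
      PySem.List.pySetD_of_nonneg _ _ (by omega)
    rw [hset1, hset2] at ih ⊢
    have hlen : ((xs.set i.toNat b).set j.toNat a).length = xs.length := by simp
    rw [ih k (by omega) (by rw [hlen]; omega)]
    have hget : ∀ (m : Nat), ((xs.set i.toNat b).set j.toNat a)[m]? =
        if j.toNat = m then some a else if i.toNat = m then some b else xs[m]? := by
      intro m
      rw [List.getElem?_set]
      by_cases c1 : j.toNat = m
      · subst c1
        rw [if_pos rfl, if_pos rfl, if_pos (by simp; omega)]
      · rw [if_neg c1, if_neg c1, List.getElem?_set]
        by_cases c2 : i.toNat = m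
        · subst c2
          rw [if_pos rfl, if_pos rfl, if_pos (by omega)]
        · rw [if_neg c2, if_neg c2]
    by_cases hk1 : (k : Int) = i
    · have hno : ¬ (i + 1 ≤ (k : Int) ∧ (k : Int) ≤ j - 1) := by omega
      rw [if_neg hno, hget, if_neg (by omega), if_pos (by omega), hb]
      rw [if_pos (by omega)]
      have he : (i + j - (k : Int)).toNat = j.toNat := by omega
      rw [he, List.getElem?_eq_getElem (by omega)]
    · by_cases hk2 : (k : Int) = j
      · have hno : ¬ (i + 1 ≤ (k : Int) ∧ (k : Int) ≤ j - 1) := by omega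
        rw [if_neg hno, hget, if_pos (by omega), ha]
        rw [if_pos (by omega)]
        have he : (i + j - (k : Int)).toNat = i.toNat := by omega
        rw [he, List.getElem?_eq_getElem (by omega)]
      · by_cases hk3 : i + 1 ≤ (k : Int) ∧ (k : Int) ≤ j - 1
        · rw [if_pos hk3, hget, if_neg (by omega), if_neg (by omega), if_pos (by omega)]
          congr 1
          omega
        · rw [if_neg hk3, hget, if_neg (by omega), if_neg (by omega), if_neg (by omega)]

theorem loop1_len (d : Int) : ∀ (l : List Int) (xs : List Int),
    (l.foldl (fun ys t => PySem.List.pySetD ys (t - d) (PySem.List.pyGetD ys t 0)) xs).length = xs.length := by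
  intro l
  induction l with
  | nil => intro xs; rfl
  | cons t l ih => intro xs; rw [List.foldl_cons, ih, PySem.List.length_pySetD]

-- first loop of A: for i in range(d, N): nums[i-d] = nums[i]
theorem loopA1_get (d N : Int) (hd : 0 < d) :
    ∀ (n : Nat) (i : Int) (xs : List Int), (N - i).toNat = n → d ≤ i → N ≤ (xs.length : Int) →
    ∀ k : Nat,
      ((PySem.List.pyRange i N 1).foldl
        (fun ys t => PySem.List.pySetD ys (t - d) (PySem.List.pyGetD ys t 0)) xs)[k]? =
      if i - d ≤ (k : Int) ∧ (k : Int) < N - d then xs[((k : Int) + d).toNat]? else xs[k]? := by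
  intro n
  induction n with
  | zero =>
    intro i xs hn hdi hN k
    rw [PySem.List.pyRange_one_eq_nil (by omega), List.foldl_nil, if_neg (by omega)]
  | succ n ih =>
    intro i xs hn hdi hN k
    rw [PySem.List.pyRange_one_cons (by omega), List.foldl_cons]
    have hv : PySem.List.pyGetD xs i 0 = xs[i.toNat] :=
      PySem.List.pyGetD_eq_getElem _ _ (by omega) (by omega)
    have hs : PySem.List.pySetD xs (i - d) (PySem.List.pyGetD xs i 0)
        = xs.set (i - d).toNat xs[i.toNat] := by
      rw [hv]; exact PySem.List.pySetD_of_nonneg _ _ (by omega)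
    rw [hs, ih (i + 1) _ (by omega) (by omega) (by simp; omega) k]
    have hget : ∀ (m : Nat), (xs.set (i - d).toNat xs[i.toNat])[m]? =
        if (i - d).toNat = m then some xs[i.toNat] else xs[m]? := by
      intro m
      rw [List.getElem?_set]
      by_cases c1 : (i - d).toNat = m
      · subst c1; rw [if_pos rfl, if_pos rfl, if_pos (by omega)]
      · rw [if_neg c1, if_neg c1]
    by_cases hk1 : (k : Int) = i - d
    · rw [if_neg (by omega), hget, if_pos (by omega), if_pos (by omega)]
      have he : ((k : Int) + d).toNat = i.toNat := by omega
      rw [he, List.getElem?_eq_getElem (by omega)]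
    · by_cases hk2 : i + 1 - d ≤ (k : Int) ∧ (k : Int) < N - d
      · rw [if_pos hk2, hget, if_neg (by omega), if_pos (by omega)]
      · rw [if_neg hk2, hget, if_neg (by omega), if_neg (by omega)]

-- second loop of A, with the written value an arbitrary function of the index
theorem loopA2_get (N : Int) (g : Int → Int) :
    ∀ (n : Nat) (i : Int) (xs : List Int), (N - i).toNat = n → 0 ≤ i → N ≤ (xs.length : Int) →
    ∀ k : Nat,
      ((PySem.List.pyRange i N 1).foldl (fun ys t => PySem.List.pySetD ys t (g t)) xs)[k]? =
      if i ≤ (k : Int) ∧ (k : Int) < N then some (g (k : Int)) else xs[k]? := by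
  intro n
  induction n with
  | zero =>
    intro i xs hn h0 hN k
    rw [PySem.List.pyRange_one_eq_nil (by omega), List.foldl_nil, if_neg (by omega)]
  | succ n ih =>
    intro i xs hn h0 hN k
    rw [PySem.List.pyRange_one_cons (by omega), List.foldl_cons]
    have hs : PySem.List.pySetD xs i (g i) = xs.set i.toNat (g i) :=
      PySem.List.pySetD_of_nonneg _ _ h0
    rw [hs, ih (i + 1) _ (by omega) (by omega) (by simp; omega) k]
    have hget : ∀ (m : Nat), (xs.set i.toNat (g i))[m]? =
        if i.toNat = m then some (g i) else xs[m]? := by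
      intro m
      rw [List.getElem?_set]
      by_cases c1 : i.toNat = m
      · subst c1; rw [if_pos rfl, if_pos rfl, if_pos (by omega)]
      · rw [if_neg c1, if_neg c1]
    by_cases hk1 : (k : Int) = i
    · rw [if_neg (by omega), hget, if_pos (by omega), if_pos (by omega), hk1]
    · by_cases hk2 : i + 1 ≤ (k : Int) ∧ (k : Int) < N
      · rw [if_pos hk2, if_pos (by omega)]
      · rw [if_neg hk2, hget, if_neg (by omega), if_neg (by omega)]

theorem pvRev_no_op (xs : List Int) (i j : Int) (h : ¬ i < j) : pvRev xs i j = xs := by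
  rw [pvRev, if_neg h]

-- ===== VERDICT (by name: the statement is the Claim_ definition above) =====
theorem leftRotateArrayByDPlacesBetterSolution_spec : Claim_equal_leftRotateArrayByDPlacesBetterSolution := by
  intro nums N D _ hpre
  obtain ⟨hN0, hle⟩ := hpre
  unfold Spec_leftRotateArrayByDPlacesBetterSolution
  simp only [leftRotateArrayByDPlacesBetterSolution, leftRotateArrayByDPlacesBetterSolution_alt]
  by_cases hd : PySem.Int.mod D N = 0
  · rw [if_pos hd, if_pos hd]
  · rw [if_neg hd, if_neg hd]
    have hlen : N ≤ (nums.length : Int) := by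
      rcases hle with h | h
      · exact h
      · exact absurd h hd
    rcases lt_trichotomy N 0 with hN | hN | hN
    · -- N < 0: after `D %= N`, d is negative; all loops and all reversals are empty
      have hbounds := PySem.Int.mod_neg_bounds D hN
      rw [PySem.List.pyRange_one_eq_nil (show N ≤ PySem.Int.mod D N by omega),
          PySem.List.pyRange_one_eq_nil (show N ≤ N - PySem.Int.mod D N by omega),
          List.foldl_nil, List.foldl_nil,
          pvRev_no_op _ _ _ (show ¬ (0:Int) < PySem.Int.mod D N - 1 by omega),
          pvRev_no_op _ _ _ (show ¬ PySem.Int.mod D N < N - 1 by omega),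
          pvRev_no_op _ _ _ (show ¬ (0:Int) < N - 1 by omega)]
    · exact absurd hN hN0
    · -- 0 < N (and then 0 < d < N ≤ len nums)
      have hd0 : 0 ≤ PySem.Int.mod D N := PySem.Int.mod_nonneg D hN
      have hdN : PySem.Int.mod D N < N := PySem.Int.mod_lt D hN
      have hdpos : 0 < PySem.Int.mod D N := by omega
      set d := PySem.Int.mod D N with hdd
      have hL1 : (pvRev nums 0 (d - 1)).length = nums.length := pvRev_length _ _ _
      have hL2 : (pvRev (pvRev nums 0 (d - 1)) d (N - 1)).length = nums.length := by
        rw [pvRev_length, hL1]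
      have hX1 : ((PySem.List.pyRange d N 1).foldl
          (fun ys t => PySem.List.pySetD ys (t - d) (PySem.List.pyGetD ys t 0)) nums).length
          = nums.length := loop1_len d _ nums
      apply List.ext_getElem?
      intro k
      rw [loopA2_get N _ (N - (N - d)).toNat (N - d) _ rfl (by omega) (by rw [hX1]; omega) k]
      rw [loopA1_get d N hdpos (N - d).toNat d nums rfl (by omega) hlen k]
      rw [pvRev_get _ 0 (N - 1) k (by omega) (by rw [hL2]; omega)]
      by_cases hr1 : (k : Int) < N - d
      · -- shifted region: position k gets old nums[k + d]
        rw [if_neg (by omega), if_pos (by omega), if_pos (by omega)]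
        rw [pvRev_get _ d (N - 1) _ (by omega) (by rw [hL1]; omega),
            if_pos (by constructor <;> omega)]
        rw [pvRev_get nums 0 (d - 1) _ (by omega) (by omega), if_neg (by omega)]
        congr 1
        omega
      · by_cases hr2 : (k : Int) < N
        · -- wrapped region: position k gets temp[k - (N - d)] = old nums[k - (N - d)]
          rw [if_pos (by omega), if_pos (by omega)]
          rw [PySem.List.pyGetD_map_pyRange_of_nonneg _ d _ 0 (by omega) (by omega)]
          rw [PySem.List.pyGetD_eq_getElem _ _ (by omega) (by omega)]
          rw [pvRev_get _ d (N - 1) _ (by omega) (by rw [hL1]; omega), if_neg (by omega)]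
          rw [pvRev_get nums 0 (d - 1) _ (by omega) (by omega), if_pos (by constructor <;> omega)]
          have he : ((0 : Int) + (d - 1) - ((((0 : Int) + (N - 1) - (k : Int)).toNat : Nat) : Int)).toNat
              = ((k : Int) - (N - d)).toNat := by omega
          rw [he, List.getElem?_eq_getElem (by omega)]
        · -- tail beyond N: untouched
          rw [if_neg (by omega), if_neg (by omega), if_neg (by omega)]
          rw [pvRev_get _ d (N - 1) _ (by omega) (by rw [hL1]; omega), if_neg (by omega)]
          rw [pvRev_get nums 0 (d - 1) _ (by omega) (by omega), if_neg (by omega)]
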